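-- pv_equiv track=rewrite | github.com/karister89/lottoaiop | engines/core_pair_optimizer.py | check_streak_and_trend
-- ===== SOURCE A (Python) =====
-- def check_streak_and_trend(draws, pair, position):
--     """ตรวจสอบการแพ้ติดกัน (Streak) และแนวโน้มกำไร (Profit Trend)"""
--     p0, p1 = str(pair[0]), str(pair[1])
--     test_draws = draws[:30] # เช็คย้อนหลัง 30 งวด
--
--     losses = 0
--     consecutive_losses = 0
--     streak_broken = False
--     total_profit = 0
--
--     for i, row in enumerate(test_draws):
--         num = str(row.get('twoTop', '')).zfill(2)
--         if not num.isdigit(): continue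
--
--         target = num[0] if position == 'front' else num[1]
--         is_win = (p0 == target or p1 == target)
--
--         # คำนวณกำไรสะสม (ทุน 20 จ่าย 100)
--         total_profit += 80 if is_win else -20
--
--         # นับการแพ้ติดกันจากงวดล่าสุด (Index 0)
--         if not is_win and not streak_broken:
--             consecutive_losses += 1
--         else:
--             streak_broken = True
--
--     return consecutive_losses, total_profit
-- ===== SOURCE B (Python) =====
-- def check_streak_and_trend(draws, pair, position):
--     """Reverse-chronological scan: walk the 30-draw window oldest-first with a
--     loss counter that resets to zero on every win; after the walk it holds
--     exactly the losses leading the most-recent end, and profit is summed along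
--     the way -- no streak_broken flag, no second pass."""
--     p0, p1 = str(pair[0]), str(pair[1])
--     idx = 0 if position == 'front' else 1
--     cl = 0
--     profit = 0
--     for row in reversed(draws[:30]):
--         num = str(row.get('twoTop', '')).zfill(2)
--         if not num.isdigit():
--             continue
--         if num[idx] == p0 or num[idx] == p1:
--             cl = 0
--             profit += 80
--         else:
--             cl += 1
--             profit -= 20
--     return cl, profit
-- ===== Notes on version B (the rewrite author's own statement) =====
-- stated objective: alternative
-- what changed: B traverses the 30-draw window in the opposite (oldest-first) order with a loss counter that resets on each win, so the leading-loss streak of the recent end falls out of the reversed scan without A's streak_broken flag; profit is order-independent.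
import Mathlib
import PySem

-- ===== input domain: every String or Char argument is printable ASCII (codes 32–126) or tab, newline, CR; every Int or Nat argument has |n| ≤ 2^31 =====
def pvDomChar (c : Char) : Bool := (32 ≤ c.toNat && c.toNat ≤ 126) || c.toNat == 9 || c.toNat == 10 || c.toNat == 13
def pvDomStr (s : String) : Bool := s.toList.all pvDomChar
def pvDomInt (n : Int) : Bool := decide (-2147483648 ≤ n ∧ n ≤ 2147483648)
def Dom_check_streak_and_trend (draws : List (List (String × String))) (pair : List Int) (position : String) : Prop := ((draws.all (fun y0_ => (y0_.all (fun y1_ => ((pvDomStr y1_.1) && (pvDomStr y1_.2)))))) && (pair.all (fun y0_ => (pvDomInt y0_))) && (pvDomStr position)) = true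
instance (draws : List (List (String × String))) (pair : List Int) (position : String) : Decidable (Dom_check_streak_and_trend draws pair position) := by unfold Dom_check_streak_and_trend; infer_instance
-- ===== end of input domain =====

-- B scans the 30-draw window in the opposite (oldest-first) order with a loss counter
-- that resets on each win, replacing A's streak_broken state machine; same cost.

-- ===== PORT A =====
-- num = str(row.get('twoTop','')).zfill(2)
def pvNum (row : List (String × String)) : String :=
  PySem.Str.zfill (PySem.Dict.getD (PySem.Dict.mk row) "twoTop" "") 2

-- Python's 1-character string s[i]; the .getD "" is unreachable here since zfill 2 gives length ≥ 2
def pvCharStr (o : Option Char) : String := (o.map (fun c => String.ofList [c])).getD ""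

-- the body of A's for-loop, state = (consecutive_losses, streak_broken, total_profit)
def pvStepA (p0 p1 position : String) (s : Int × Bool × Int) (row : List (String × String)) : Int × Bool × Int :=
  let num := pvNum row
  if PySem.Str.strIsdigit num then
    let target := if position == "front" then pvCharStr (PySem.Str.pyGet? num 0)
                  else pvCharStr (PySem.Str.pyGet? num 1)
    let is_win := p0 == target || p1 == target
    let tp := s.2.2 + (if is_win then 80 else -20)
    if !is_win && !s.2.1 then (s.1 + 1, s.2.1, tp) else (s.1, true, tp)
  else s

def check_streak_and_trend (draws : List (List (String × String))) (pair : List Int) (position : String) : Int × Int :=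
  match PySem.List.pyGet? pair 0, PySem.List.pyGet? pair 1 with
  | some a, some b =>
    let p0 := PySem.Int.toStr a
    let p1 := PySem.Int.toStr b
    let test_draws := PySem.List.slice draws none (some 30)
    let s := test_draws.foldl (pvStepA p0 p1 position) (0, false, 0)
    (s.1, s.2.2)
  | _, _ => (0, 0)   -- Python raises IndexError here; excluded by Pre_

-- ===== PORT B =====
-- B's own copies of the shared row expressions
def pvNumB (row : List (String × String)) : String :=
  PySem.Str.zfill (PySem.Dict.getD (PySem.Dict.mk row) "twoTop" "") 2
def pvCharStrB (o : Option Char) : String := (o.map (fun c => String.ofList [c])).getD ""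

-- body of B's loop over the REVERSED window, state = (cl, profit)
def pvStepB (p0 p1 : String) (idx : Int) (s : Int × Int) (row : List (String × String)) : Int × Int :=
  let num := pvNumB row
  if PySem.Str.strIsdigit num then
    let t := pvCharStrB (PySem.Str.pyGet? num idx)
    if t == p0 || t == p1 then (0, s.2 + 80) else (s.1 + 1, s.2 - 20)
  else s

def check_streak_and_trend_alt (draws : List (List (String × String))) (pair : List Int) (position : String) : Int × Int :=
  match PySem.List.pyGet? pair 0 with
  | none => (0, 0)   -- Python raises IndexError here; excluded by Pre_
  | some a =>
  match PySem.List.pyGet? pair 1 with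
  | none => (0, 0)   -- Python raises IndexError here; excluded by Pre_
  | some b =>
    let p0 := PySem.Int.toStr a
    let p1 := PySem.Int.toStr b
    let idx : Int := if position == "front" then 0 else 1
    ((PySem.List.slice draws none (some 30)).reverse).foldl (pvStepB p0 p1 idx) (0, 0)

-- ===== PRECONDITION & SPEC =====
-- Pre_ excludes only inputs where A raises: pair[0]/pair[1] raise IndexError when pair has < 2 elements
def Pre_check_streak_and_trend (draws : List (List (String × String))) (pair : List Int) (position : String) : Prop := 2 ≤ pair.length
instance (draws : List (List (String × String))) (pair : List Int) (position : String) : Decidable (Pre_check_streak_and_trend draws pair position) := by unfold Pre_check_streak_and_trend; infer_instance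

def pvWitness_check_streak_and_trend : (List (List (String × String))) × List Int × String := ([[("twoTop", "12")], [("twoTop", "ab")]], [1, 3], "front")

def Spec_check_streak_and_trend (draws : List (List (String × String))) (pair : List Int) (position : String) (out : Int × Int) : Prop := out = check_streak_and_trend_alt draws pair position
instance (draws : List (List (String × String))) (pair : List Int) (position : String) (out : Int × Int) : Decidable (Spec_check_streak_and_trend draws pair position out) := by unfold Spec_check_streak_and_trend; infer_instance

-- ===== CLAIM =====
def Claim_equal_check_streak_and_trend : Prop := ∀ (draws : List (List (String × String))) (pair : List Int) (position : String), Dom_check_streak_and_trend draws pair position → Pre_check_streak_and_trend draws pair position → Spec_check_streak_and_trend draws pair position (check_streak_and_trend draws pair position)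

-- ===== LEMMAS AND PROOFS =====

-- optional win boolean of a row (none = row skipped by both loops)
def pvWin (p0 p1 : String) (idx : Int) (row : List (String × String)) : Option Bool :=
  let num := pvNum row
  if PySem.Str.strIsdigit num then
    some (p0 == pvCharStr (PySem.Str.pyGet? num idx) || p1 == pvCharStr (PySem.Str.pyGet? num idx))
  else none

-- the pure win-list steps the two loops reduce to
def pvStepW (s : Int × Bool × Int) (w : Bool) : Int × Bool × Int :=
  let tp := s.2.2 + (if w then 80 else -20)
  if !w && !s.2.1 then (s.1 + 1, s.2.1, tp) else (s.1, true, tp)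
def pvW (s : Int × Int) (w : Bool) : Int × Int :=
  if w then (0, s.2 + 80) else (s.1 + 1, s.2 - 20)

-- leading-loss count of a win list
def pvCL : List Bool → Int
  | [] => 0
  | w :: t => if w then 0 else pvCL t + 1

lemma pvStepA_eq_win (p0 p1 position : String) (s : Int × Bool × Int) (row : List (String × String)) :
    pvStepA p0 p1 position s row =
      match pvWin p0 p1 (if position == "front" then 0 else 1) row with
      | none => s
      | some w => pvStepW s w := by
  by_cases hp : (position == "front") = true <;>
  by_cases h : PySem.Str.strIsdigit (pvNum row) = true <;>
    simp only [pvStepA, pvWin, pvStepW, hp, h, Bool.false_eq_true, if_true, if_false]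

lemma pvStepB_eq_win (p0 p1 : String) (idx : Int) (s : Int × Int) (row : List (String × String)) :
    pvStepB p0 p1 idx s row =
      match pvWin p0 p1 idx row with
      | none => s
      | some w => pvW s w := by
  have e : ∀ x : String, (x == p0 || x == p1) = (p0 == x || p1 == x) := by
    intro x; rw [@BEq.comm _ _ _ x p0, @BEq.comm _ _ _ x p1]
  have hb : pvNumB = pvNum := rfl
  have hc : pvCharStrB = pvCharStr := rfl
  by_cases h : PySem.Str.strIsdigit (pvNum row) = true <;>
    simp only [pvStepB, pvWin, pvW, hb, hc, e, h, Bool.false_eq_true, if_true, if_false]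

lemma foldA_eq_foldW (p0 p1 position : String) (L : List (List (String × String))) (s : Int × Bool × Int) :
    L.foldl (pvStepA p0 p1 position) s =
      (L.filterMap (pvWin p0 p1 (if position == "front" then 0 else 1))).foldl pvStepW s := by
  induction L generalizing s with
  | nil => rfl
  | cons r t ih =>
    simp only [List.foldl_cons, List.filterMap_cons]
    rw [pvStepA_eq_win]
    cases pvWin p0 p1 (if position == "front" then 0 else 1) r with
    | none => exact ih _
    | some w => simp only [List.foldl_cons]; exact ih _

lemma foldB_eq_foldW (p0 p1 : String) (idx : Int) (L : List (List (String × String))) (s : Int × Int) :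
    L.foldl (pvStepB p0 p1 idx) s = (L.filterMap (pvWin p0 p1 idx)).foldl pvW s := by
  induction L generalizing s with
  | nil => rfl
  | cons r t ih =>
    simp only [List.foldl_cons, List.filterMap_cons]
    rw [pvStepB_eq_win]
    cases pvWin p0 p1 idx r with
    | none => exact ih _
    | some w => simp only [List.foldl_cons]; exact ih _

lemma foldW_broken (ws : List Bool) (cl tp : Int) :
    (ws.foldl pvStepW (cl, true, tp)).1 = cl := by
  induction ws generalizing tp with
  | nil => rfl
  | cons w t ih => cases w <;> simp [pvStepW, ih]

lemma foldW_cl (ws : List Bool) (cl tp : Int) :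
    (ws.foldl pvStepW (cl, false, tp)).1 = cl + pvCL ws := by
  induction ws generalizing cl tp with
  | nil => simp [pvCL]
  | cons w t ih =>
    cases w with
    | true => simp [pvStepW, pvCL, foldW_broken]
    | false => simp only [List.foldl_cons, pvStepW, Bool.not_false, Bool.and_self, if_true,
        ih, pvCL, Bool.false_eq_true, if_false]; ring

lemma foldW_profit (ws : List Bool) (s : Int × Bool × Int) :
    (ws.foldl pvStepW s).2.2 = s.2.2 + 100 * (ws.count true : Int) - 20 * (ws.length : Int) := by
  induction ws generalizing s with
  | nil => simp
  | cons w t ih =>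
    simp only [List.foldl_cons, ih, pvStepW]
    cases w <;> cases s.2.1 <;> simp <;> push_cast <;> ring

lemma foldWrev (ws : List Bool) :
    ws.reverse.foldl pvW (0, 0) =
      (pvCL ws, 100 * (ws.count true : Int) - 20 * (ws.length : Int)) := by
  induction ws with
  | nil => simp [pvCL]
  | cons w t ih =>
    rw [List.reverse_cons, List.foldl_append, ih]
    cases w <;> simp [pvW, pvCL] <;> push_cast <;> ring

theorem pv_main (draws : List (List (String × String))) (pair : List Int) (position : String)
    (hp : 2 ≤ pair.length) :
    check_streak_and_trend draws pair position = check_streak_and_trend_alt draws pair position := by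
  match pair, hp with
  | a :: b :: rest, _ =>
    have hn : (0:Int) ≤ (rest.length:Int) + 1 := by positivity
    have h0 : PySem.List.pyGet? (a :: b :: rest) (0:Int) = some a := by
      simp [PySem.List.pyGet?, PySem.List.pyIdx?, hn]
    have h1 : PySem.List.pyGet? (a :: b :: rest) (1:Int) = some b := by
      simp [PySem.List.pyGet?, PySem.List.pyIdx?, hn]
    simp only [check_streak_and_trend, check_streak_and_trend_alt, h0, h1]
    rw [foldA_eq_foldW, foldB_eq_foldW, List.filterMap_reverse, foldWrev]
    simp only [Prod.mk.injEq]
    exact ⟨by rw [foldW_cl]; ring, by rw [foldW_profit]; ring⟩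

-- ===== VERDICT =====
theorem check_streak_and_trend_spec : Claim_equal_check_streak_and_trend := by
  intro draws pair position _ hpre
  exact pv_main draws pair position hpre
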